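-- pv_equiv track=rewrite | github.com/ykdy3951/Baekjoon | 2230.py | solution
-- ===== SOURCE A (Python) =====
-- def solution(l : list, m : int) -> int:
--     l.sort()
--     N = len(l)
--     fidx, sidx = 0, 0
--     ans = 2_000_000_000
--     while fidx < N and sidx < N:
--         if l[sidx] - l[fidx] == m:
--             return m
--         if l[sidx] - l[fidx] < m:
--             sidx += 1
--         else:
--             ans = min(ans, l[sidx] - l[fidx])
--             fidx += 1
--     return ans
-- ===== SOURCE B (Python) =====
-- import bisect
--
-- def solution(l: list, m: int) -> int:
--     l.sort()
--     ans = 2_000_000_000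
--     n = len(l)
--     for i in range(n):
--         j = bisect.bisect_left(l, l[i] + m)
--         if j < n:
--             ans = min(ans, l[j] - l[i])
--     return ans
-- ===== Notes on version B (the rewrite author's own statement) =====
-- stated objective: idiomatic
-- what changed: Replaced the two-pointer while-loop (with early return) by a per-element binary search: for each element of the sorted list, bisect_left finds the closest partner at distance >= m, and a running minimum over these is returned.
-- outside the precondition, e.g. on solution([-2147483648, 0], 2147483648): A returns 2147483648, B returns 2000000000
import Mathlib
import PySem

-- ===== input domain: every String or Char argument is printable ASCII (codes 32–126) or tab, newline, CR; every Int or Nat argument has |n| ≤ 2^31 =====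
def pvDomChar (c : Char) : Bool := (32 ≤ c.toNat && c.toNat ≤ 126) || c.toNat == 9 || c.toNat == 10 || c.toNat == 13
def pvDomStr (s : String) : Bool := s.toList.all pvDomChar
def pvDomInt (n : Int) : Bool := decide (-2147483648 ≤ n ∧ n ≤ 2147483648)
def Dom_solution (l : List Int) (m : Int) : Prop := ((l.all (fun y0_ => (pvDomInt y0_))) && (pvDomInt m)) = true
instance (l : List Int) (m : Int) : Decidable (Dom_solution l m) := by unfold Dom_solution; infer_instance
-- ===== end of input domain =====

-- B replaces A's two-pointer scan by a binary search (bisect_left) per element of the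
-- sorted list; equivalence is about the RETURN value (both A and B sort l in place).

-- ===== PORT A =====
-- the while-loop of A: state (fidx, sidx, ans); each iteration moves one of the pointers
def solLoop (a : List Int) (m : Int) (fidx sidx : Nat) (ans : Int) : Int :=
  if h : fidx < a.length ∧ sidx < a.length then
    if a.getD sidx 0 - a.getD fidx 0 = m then m
    else if a.getD sidx 0 - a.getD fidx 0 < m then solLoop a m fidx (sidx + 1) ans
    else solLoop a m (fidx + 1) sidx (min ans (a.getD sidx 0 - a.getD fidx 0))
  else ans
termination_by (a.length - fidx) + (a.length - sidx)
decreasing_by all_goals omega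

def solution (l : List Int) (m : Int) : Int :=
  solLoop (PySem.List.sorted l (fun x => x)) m 0 0 2000000000

-- ===== PORT B =====
-- one iteration of B's for-loop: binary search for the closest partner of element i
def solStep (a : List Int) (m : Int) (ans : Int) (i : Nat) : Int :=
  let j := PySem.List.bisectLeft a (a.getD i 0 + m)
  if j < a.length then min ans (a.getD j 0 - a.getD i 0) else ans

def solution_alt (l : List Int) (m : Int) : Int :=
  let a := PySem.List.sorted l (fun x => x)
  (List.range a.length).foldl (solStep a m) 2000000000

-- ===== PRECONDITION & SPEC =====
-- Pre_ excludes inputs with m > 2_000_000_000 (beyond the Baekjoon problem's bound) that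
-- contain a pair at distance exactly m: there A's early "return m" exceeds the sentinel
-- 2_000_000_000 while B's running minimum is capped by it.
def Pre_solution (l : List Int) (m : Int) : Prop :=
  m ≤ 2000000000 ∨ ∀ x ∈ l, ∀ y ∈ l, y - x ≠ m
instance (l : List Int) (m : Int) : Decidable (Pre_solution l m) := by unfold Pre_solution; infer_instance
def pvWitness_solution : List Int × Int := ([1, 3, 8], 3)

def Spec_solution (l : List Int) (m : Int) (out : Int) : Prop := out = solution_alt l m
instance (l : List Int) (m : Int) (out : Int) : Decidable (Spec_solution l m out) := by unfold Spec_solution; infer_instance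

-- ===== CLAIM (what is proved, stated in full; the proofs are below) =====
def Claim_equal_solution : Prop := ∀ (l : List Int) (m : Int), Dom_solution l m → Pre_solution l m → Spec_solution l m (solution l m)

-- ===== LEMMAS AND PROOFS =====

-- B's running minimum after the first k iterations
def Bfold (a : List Int) (m : Int) (k : Nat) : Int :=
  (List.range k).foldl (solStep a m) 2000000000

theorem getD_mono (a : List Int) (P : a.Pairwise (· ≤ ·)) (i j : Nat) (hij : i ≤ j)
    (hj : j < a.length) : a.getD i 0 ≤ a.getD j 0 := by
  rcases Nat.lt_or_eq_of_le hij with h | h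
  · have := (List.pairwise_iff_getElem.mp P) i j (by omega) hj h
    rwa [List.getD_eq_getElem a 0 (by omega), List.getD_eq_getElem a 0 hj]
  · subst h; rfl

theorem solStep_le (a : List Int) (m : Int) (ans : Int) (i : Nat) :
    solStep a m ans i ≤ ans := by
  simp only [solStep]
  split
  · exact min_le_left _ _
  · exact le_refl ans

theorem m_le_solStep (a : List Int) (m : Int) (P : a.Pairwise (· ≤ ·)) (ans : Int) (i : Nat)
    (h : m ≤ ans) : m ≤ solStep a m ans i := by
  simp only [solStep]
  split
  · rename_i hlt
    have spec := PySem.List.bisectLeft_spec a (a.getD i 0 + m) P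
    have h3 := spec.2.2 (PySem.List.bisectLeft a (a.getD i 0 + m)) hlt (le_refl _)
    rw [List.getD_eq_getElem a 0 hlt]
    exact le_min h (by omega)
  · exact h

theorem foldl_solStep_le (a : List Int) (m : Int) (L : List Nat) (ans : Int) :
    L.foldl (solStep a m) ans ≤ ans := by
  induction L generalizing ans with
  | nil => exact le_refl ans
  | cons x L ih => exact le_trans (ih (solStep a m ans x)) (solStep_le a m ans x)

theorem m_le_foldl_solStep (a : List Int) (m : Int) (P : a.Pairwise (· ≤ ·)) (L : List Nat)
    (ans : Int) (h : m ≤ ans) : m ≤ L.foldl (solStep a m) ans := by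
  induction L generalizing ans with
  | nil => exact h
  | cons x L ih => exact ih (solStep a m ans x) (m_le_solStep a m P ans x h)

theorem Bfold_succ (a : List Int) (m : Int) (k : Nat) :
    Bfold a m (k + 1) = solStep a m (Bfold a m k) k := by
  unfold Bfold
  rw [List.range_succ, List.foldl_append]
  rfl

theorem Bfold_le_step (a : List Int) (m : Int) (i n : Nat) (h : i < n) :
    Bfold a m n ≤ solStep a m (Bfold a m i) i := by
  have hsplit : n = (i + 1) + (n - i - 1) := by omega
  unfold Bfold
  rw [hsplit, List.range_add, List.foldl_append]
  have h1 : (List.range (i + 1)).foldl (solStep a m) 2000000000 = solStep a m (Bfold a m i) i := by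
    rw [List.range_succ, List.foldl_append]; rfl
  rw [h1]
  exact foldl_solStep_le a m _ _

theorem foldl_solStep_id (a : List Int) (m : Int) (L : List Nat) (ans : Int)
    (h : ∀ i ∈ L, ¬ PySem.List.bisectLeft a (a.getD i 0 + m) < a.length) :
    L.foldl (solStep a m) ans = ans := by
  induction L generalizing ans with
  | nil => rfl
  | cons x L ih =>
    have hx : solStep a m ans x = ans := by
      simp only [solStep]
      split
      · exact absurd (by assumption) (h x (List.mem_cons_self))
      · rfl
    simp only [List.foldl_cons, hx]
    exact ih ans (fun i hi => h i (List.mem_cons_of_mem x hi))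

theorem Bfold_stable (a : List Int) (m : Int) (f : Nat) (hf : f ≤ a.length)
    (h : ∀ i, f ≤ i → i < a.length → ¬ PySem.List.bisectLeft a (a.getD i 0 + m) < a.length) :
    Bfold a m a.length = Bfold a m f := by
  have hsplit : a.length = f + (a.length - f) := by omega
  unfold Bfold
  rw [hsplit, List.range_add, List.foldl_append]
  exact foldl_solStep_id a m _ _ (by
    intro i hi
    rw [List.mem_map] at hi
    obtain ⟨x, hx, rfl⟩ := hi
    rw [List.mem_range] at hx
    exact h (f + x) (by omega) (by omega))

-- the main loop invariant: ans is B's running minimum over the first fidx elements, and no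
-- element before sidx is a qualifying partner for any index ≥ fidx
theorem loop_eq (a : List Int) (m : Int) (P : a.Pairwise (· ≤ ·))
    (hm : m ≤ 2000000000 ∨ ∀ x ∈ a, ∀ y ∈ a, y - x ≠ m) :
    ∀ (k fidx sidx : Nat) (ans : Int),
      (a.length - fidx) + (a.length - sidx) ≤ k →
      fidx ≤ a.length → sidx ≤ a.length →
      (∀ j, j < sidx → ∀ i, fidx ≤ i → i < a.length → a.getD j 0 < a.getD i 0 + m) →
      ans = Bfold a m fidx →
      solLoop a m fidx sidx ans = Bfold a m a.length := by
  intro k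
  induction k with
  | zero =>
    intro fidx sidx ans hk hf hs hI2 hans
    rw [solLoop, dif_neg (by omega)]
    have : fidx = a.length := by omega
    rw [hans, this]
  | succ k ih =>
    intro fidx sidx ans hk hf hs hI2 hans
    rw [solLoop]
    by_cases hin : fidx < a.length ∧ sidx < a.length
    · obtain ⟨hfN, hsN⟩ := hin
      rw [dif_pos ⟨hfN, hsN⟩]
      have spec := PySem.List.bisectLeft_spec a (a.getD fidx 0 + m) P
      by_cases heq : a.getD sidx 0 - a.getD fidx 0 = m
      · rw [if_pos heq]
        -- an exact pair exists: B's minimum is exactly m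
        have hm' : m ≤ 2000000000 := by
          rcases hm with h | h
          · exact h
          · exfalso
            refine h (a.getD fidx 0) ?_ (a.getD sidx 0) ?_ heq
            · rw [List.getD_eq_getElem a 0 hfN]; exact List.getElem_mem hfN
            · rw [List.getD_eq_getElem a 0 hsN]; exact List.getElem_mem hsN
        have hjle : PySem.List.bisectLeft a (a.getD fidx 0 + m) ≤ sidx := by
          by_contra hc
          have := spec.2.1 sidx hsN (by omega)
          rw [← List.getD_eq_getElem a 0 hsN] at this
          omega
        have hjN : PySem.List.bisectLeft a (a.getD fidx 0 + m) < a.length := by omega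
        have hupper : Bfold a m a.length ≤ m := by
          refine le_trans (Bfold_le_step a m fidx a.length hfN) ?_
          have hstep : solStep a m (Bfold a m fidx) fidx =
              min (Bfold a m fidx) (a.getD (PySem.List.bisectLeft a (a.getD fidx 0 + m)) 0 - a.getD fidx 0) := by
            simp only [solStep]
            rw [if_pos hjN]
          rw [hstep]
          have hmono := getD_mono a P (PySem.List.bisectLeft a (a.getD fidx 0 + m)) sidx hjle hsN
          have : a.getD (PySem.List.bisectLeft a (a.getD fidx 0 + m)) 0 - a.getD fidx 0 ≤ m := by omega
          exact le_trans (min_le_right _ _) this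
        have hlower : m ≤ Bfold a m a.length :=
          m_le_foldl_solStep a m P (List.range a.length) 2000000000 hm'
        omega
      · rw [if_neg heq]
        by_cases hlt : a.getD sidx 0 - a.getD fidx 0 < m
        · rw [if_pos hlt]
          refine ih fidx (sidx + 1) ans (by omega) hf (by omega) ?_ hans
          intro j hj i hfi hiN
          rcases Nat.lt_or_eq_of_le (Nat.lt_succ_iff.mp hj) with h' | h'
          · exact hI2 j h' i hfi hiN
          · subst h'
            have := getD_mono a P fidx i hfi hiN
            omega
        · rw [if_neg hlt]
          -- the two-pointer's qualifying partner for fidx IS bisectLeft's result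
          have hjs : PySem.List.bisectLeft a (a.getD fidx 0 + m) = sidx := by
            have h1 : PySem.List.bisectLeft a (a.getD fidx 0 + m) ≤ sidx := by
              by_contra hc
              have := spec.2.1 sidx hsN (by omega)
              rw [← List.getD_eq_getElem a 0 hsN] at this
              omega
            have h2 : sidx ≤ PySem.List.bisectLeft a (a.getD fidx 0 + m) := by
              by_contra hc
              have hjN : PySem.List.bisectLeft a (a.getD fidx 0 + m) < a.length := by omega
              have := spec.2.2 (PySem.List.bisectLeft a (a.getD fidx 0 + m)) hjN (le_refl _)
              have h3 := hI2 (PySem.List.bisectLeft a (a.getD fidx 0 + m)) (by omega) fidx (le_refl _) hfN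
              rw [← List.getD_eq_getElem a 0 hjN] at this
              omega
            omega
          refine ih (fidx + 1) sidx (min ans (a.getD sidx 0 - a.getD fidx 0)) (by omega)
            (by omega) hs (fun j hj i hfi hiN => hI2 j hj i (by omega) hiN) ?_
          rw [Bfold_succ]
          simp only [solStep]
          rw [hjs, if_pos hsN, hans]
    · rw [dif_neg hin]
      rcases Nat.lt_or_ge fidx a.length with hfN | hfN
      · -- sidx = a.length: no index ≥ fidx has a qualifying partner
        have hsN : sidx = a.length := by omega
        rw [hans, Bfold_stable a m fidx hf]
        intro i hfi hiN hc
        have spec := PySem.List.bisectLeft_spec a (a.getD i 0 + m) P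
        have h1 := spec.2.2 (PySem.List.bisectLeft a (a.getD i 0 + m)) hc (le_refl _)
        have h2 := hI2 (PySem.List.bisectLeft a (a.getD i 0 + m)) (by omega) i hfi hiN
        rw [← List.getD_eq_getElem a 0 hc] at h1
        omega
      · have : fidx = a.length := by omega
        rw [hans, this]

-- ===== VERDICT (by name: the statement is the Claim_ definition above) =====
theorem solution_spec : Claim_equal_solution := by
  intro l m _ hpre
  unfold Spec_solution solution solution_alt
  have hm : m ≤ 2000000000 ∨
      ∀ x ∈ PySem.List.sorted l (fun x => x), ∀ y ∈ PySem.List.sorted l (fun x => x), y - x ≠ m := by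
    rcases hpre with h | h
    · exact Or.inl h
    · exact Or.inr (fun x hx y hy =>
        h x ((PySem.List.mem_sorted l (fun x => x) false x).mp hx)
          y ((PySem.List.mem_sorted l (fun x => x) false y).mp hy))
  exact loop_eq (PySem.List.sorted l (fun x => x)) m
    (PySem.List.sorted_pairwise l (fun x => x)) hm
    ((PySem.List.sorted l (fun x => x)).length * 2) 0 0 2000000000
    (by omega) (by omega) (by omega) (by omega) rfl
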